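-- pv_equiv track=rewrite | github.com/miya256/atcoder_lib_py | legacy/other_algorithm/zeta_mobius_transform.py | superset_mobius_transform
-- ===== SOURCE A (Python) =====
-- def superset_mobius_transform(f):
--     """その要素をもつ集合の和(長さは2^n)"""
--     assert len(f) & (len(f)-1) == 0, "長さは2の冪である必要があります"
--     for i in range((len(f)-1).bit_length()):
--         bit = 1 << i
--         for j in range(len(f)):
--             if j & bit == 0:
--                 f[j] -= f[j|bit]
--     return f
-- ===== SOURCE B (Python) =====
-- def superset_mobius_transform(f):
--     """その要素をもつ集合の和(長さは2^n)"""
--     assert len(f) & (len(f)-1) == 0, "長さは2の冪である必要があります"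
--     def rec(g):
--         if len(g) <= 1:
--             return g
--         m = len(g) // 2
--         a = rec(g[:m])
--         b = rec(g[m:])
--         return [x - y for x, y in zip(a, b)] + b
--     return rec(f)
-- ===== Notes on version B (the rewrite author's own statement) =====
-- stated objective: alternative
-- what changed: Replaced A's layered in-place butterfly (outer loop over bit positions, inner scan doing f[j] -= f[j|bit]) by a divide-and-conquer recursion that transforms each half independently and then subtracts the high half from the low half pointwise; B builds a new list instead of mutating f in place.
import Mathlib
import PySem

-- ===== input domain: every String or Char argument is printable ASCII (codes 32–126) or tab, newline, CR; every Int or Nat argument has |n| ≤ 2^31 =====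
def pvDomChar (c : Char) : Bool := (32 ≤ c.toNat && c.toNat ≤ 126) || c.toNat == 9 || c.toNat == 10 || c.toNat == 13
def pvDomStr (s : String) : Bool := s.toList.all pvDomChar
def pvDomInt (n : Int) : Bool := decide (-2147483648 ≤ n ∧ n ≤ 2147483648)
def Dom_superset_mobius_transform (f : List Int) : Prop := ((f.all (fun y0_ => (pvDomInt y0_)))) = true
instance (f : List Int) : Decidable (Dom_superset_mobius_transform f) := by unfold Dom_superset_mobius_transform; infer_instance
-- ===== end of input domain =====

-- B replaces A's layered bit-by-bit butterfly loops with an in-order divide-and-conquer over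
-- the two halves (recurse on each half, then subtract the high half pointwise); equivalence is
-- about the RETURN value only (Python A mutates its argument in place, B builds a new list).

-- ===== PORT A =====
-- inner loop of A: "for j in range(len(f)): if j & bit == 0: f[j] -= f[j|bit]"
def smtInner (bit : Nat) (f : List Int) : List Int :=
  (List.range f.length).foldl
    (fun g j => if j &&& bit == 0 then g.set j (g.getD j 0 - g.getD (j ||| bit) 0) else g) f

def superset_mobius_transform (f : List Int) : List Int :=
  (List.range (Nat.size (f.length - 1))).foldl (fun g i => smtInner (1 <<< i) g) f

-- ===== PORT B =====
-- rec(g): if len(g) <= 1: g else combine of rec on the two halves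
def smtRec (g : List Int) : List Int :=
  if g.length ≤ 1 then g
  else
    let m := g.length / 2
    let a := smtRec (g.take m)
    let b := smtRec (g.drop m)
    (a.zip b).map (fun p => p.1 - p.2) ++ b
termination_by g.length
decreasing_by
  · simp only [List.length_take]; omega
  · simp only [List.length_drop]; omega

def superset_mobius_transform_alt (f : List Int) : List Int := smtRec f

-- ===== PRECONDITION & SPEC =====
-- exactly the inputs on which A's assert succeeds: the length is zero or a power of two
def Pre_superset_mobius_transform (f : List Int) : Prop :=
  f.length = 0 ∨ ∃ k ≤ f.length, f.length = 2 ^ k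
instance (f : List Int) : Decidable (Pre_superset_mobius_transform f) := by
  unfold Pre_superset_mobius_transform; infer_instance

def pvWitness_superset_mobius_transform : List Int := [3, 1, 4, 1]

def Spec_superset_mobius_transform (f : List Int) (out : List Int) : Prop := out = superset_mobius_transform_alt f
instance (f : List Int) (out : List Int) : Decidable (Spec_superset_mobius_transform f out) := by unfold Spec_superset_mobius_transform; infer_instance

-- ===== CLAIM (what is proved, stated in full; the proofs are below) =====
def Claim_equal_superset_mobius_transform : Prop := ∀ (f : List Int), Dom_superset_mobius_transform f → Pre_superset_mobius_transform f → Spec_superset_mobius_transform f (superset_mobius_transform f)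

-- ===== LEMMAS AND PROOFS =====

-- A's outer loop, running the first k layers
def smtLayers (k : Nat) (f : List Int) : List Int :=
  (List.range k).foldl (fun g i => smtInner (1 <<< i) g) f

-- ---- bit-arithmetic facts ----

theorem pv_and_two_pow_eq_zero (j i : Nat) : (j &&& 2 ^ i = 0) ↔ j.testBit i = false := by
  rw [Nat.and_two_pow]
  cases h : j.testBit i <;> simp

theorem pv_two_pow_add_eq_or {k a : Nat} (h : a < 2 ^ k) : 2 ^ k + a = 2 ^ k ||| a := by
  apply Nat.eq_of_testBit_eq
  intro i
  rcases lt_trichotomy i k with hik | rfl | hki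
  · rw [Nat.testBit_two_pow_add_gt hik, Nat.testBit_lor,
      Nat.testBit_two_pow_of_ne (by omega), Bool.false_or]
  · rw [Nat.testBit_two_pow_add_eq, Nat.testBit_lor, Nat.testBit_two_pow_self,
      Nat.testBit_eq_false_of_lt h]
    rfl
  · have h2 : 2 ^ k + a < 2 ^ i := by
      calc 2 ^ k + a < 2 ^ k + 2 ^ k := by omega
      _ = 2 ^ (k + 1) := by ring
      _ ≤ 2 ^ i := Nat.pow_le_pow_right (by norm_num) (by omega)
    rw [Nat.testBit_eq_false_of_lt h2, Nat.testBit_lor,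
      Nat.testBit_two_pow_of_ne (by omega), Nat.testBit_eq_false_of_lt (by omega)]
    rfl

-- ---- list access helpers ----

theorem pv_getD_append_left {a b : List Int} {j : Nat} (h : j < a.length) :
    (a ++ b).getD j 0 = a.getD j 0 := by
  simp [List.getD_eq_getElem?_getD, List.getElem?_append_left h]

theorem pv_getD_append_right {a b : List Int} {j : Nat} (h : a.length ≤ j) :
    (a ++ b).getD j 0 = b.getD (j - a.length) 0 := by
  simp [List.getD_eq_getElem?_getD, List.getElem?_append_right h]

theorem pv_map_getD_range (b : List Int) :
    (List.range b.length).map (fun j => b.getD j 0) = b := by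
  apply List.ext_getElem
  · simp
  · intro i h1 h2
    simp_all [List.getD_eq_getElem?_getD]

-- ---- smtInner preserves length ----

theorem pv_foldl_set_length (bit : Nat) (l : List Nat) (g : List Int) :
    ((l.foldl (fun g j => if j &&& bit == 0 then g.set j (g.getD j 0 - g.getD (j ||| bit) 0) else g) g)).length = g.length := by
  induction l generalizing g with
  | nil => rfl
  | cons x xs ih =>
      simp only [List.foldl_cons]
      rw [ih]
      split <;> simp

theorem smtInner_length (bit : Nat) (f : List Int) : (smtInner bit f).length = f.length := by
  unfold smtInner; exact pv_foldl_set_length bit _ f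

-- ---- smtInner as a pointwise map ----

theorem pv_inner_inv (i : Nat) (f : List Int) :
    ∀ m ≤ f.length,
      (List.range m).foldl
        (fun g j => if j &&& (2 ^ i) == 0 then g.set j (g.getD j 0 - g.getD (j ||| 2 ^ i) 0) else g) f
      = ((List.range m).map
          (fun j => if j &&& 2 ^ i = 0 then f.getD j 0 - f.getD (j ||| 2 ^ i) 0 else f.getD j 0))
        ++ f.drop m := by
  intro m
  induction m with
  | zero => intro _; simp
  | succ n ih =>
      intro hn1
      have hn : n < f.length := by omega
      rw [List.range_succ, List.foldl_append, List.foldl_cons, List.foldl_nil, ih (by omega),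
        List.map_append, List.map_cons, List.map_nil]
      have hMlen : ((List.range n).map
          (fun j => if j &&& 2 ^ i = 0 then f.getD j 0 - f.getD (j ||| 2 ^ i) 0 else f.getD j 0)).length = n := by
        simp
      set M := (List.range n).map
          (fun j => if j &&& 2 ^ i = 0 then f.getD j 0 - f.getD (j ||| 2 ^ i) 0 else f.getD j 0) with hM
      have hgetn : (M ++ f.drop n).getD n 0 = f.getD n 0 := by
        rw [pv_getD_append_right (by omega), hMlen, Nat.sub_self,
          List.getD_eq_getElem?_getD, List.getElem?_drop, List.getD_eq_getElem?_getD,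
          Nat.add_zero]
      have hdropn : f.drop n = f[n] :: f.drop (n + 1) := List.drop_eq_getElem_cons hn
      by_cases hb : n &&& 2 ^ i = 0
      · have hbb : (n &&& 2 ^ i == 0) = true := by simp [hb]
        have htb : n.testBit i = false := (pv_and_two_pow_eq_zero n i).mp hb
        have hgt : n + 1 ≤ n ||| 2 ^ i := by
          have h1 : n ≤ n ||| 2 ^ i := Nat.left_le_or
          have h2 : n ≠ n ||| 2 ^ i := by
            intro hc
            have := Nat.testBit_lor n (2 ^ i) i
            rw [← hc, htb, Nat.testBit_two_pow_self] at this
            simp at this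
          omega
        have hgeto : (M ++ f.drop n).getD (n ||| 2 ^ i) 0 = f.getD (n ||| 2 ^ i) 0 := by
          rw [pv_getD_append_right (by omega), hMlen,
            List.getD_eq_getElem?_getD, List.getElem?_drop, List.getD_eq_getElem?_getD,
            Nat.add_sub_cancel' (by omega)]
        rw [hbb, if_pos rfl, hgetn, hgeto, List.set_append, if_neg (by omega), hMlen,
          Nat.sub_self, hdropn, List.set_cons_zero, if_pos hb, List.append_assoc,
          List.singleton_append, List.getD_eq_getElem?_getD, List.getElem?_eq_getElem hn]
      · have hbb : (n &&& 2 ^ i == 0) = false := by simp [hb]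
        rw [hbb, if_neg (by simp), if_neg hb, hdropn, List.append_assoc, List.singleton_append,
          List.getD_eq_getElem?_getD, List.getElem?_eq_getElem hn]
        rfl

theorem smtInner_eq (i : Nat) (f : List Int) :
    smtInner (2 ^ i) f =
      (List.range f.length).map
        (fun j => if j &&& 2 ^ i = 0 then f.getD j 0 - f.getD (j ||| 2 ^ i) 0 else f.getD j 0) := by
  have h := pv_inner_inv i f f.length le_rfl
  unfold smtInner
  simpa using h

-- ---- split lemmas ----

theorem smtInner_split {k i : Nat} (hik : i < k) {a b : List Int}
    (ha : a.length = 2 ^ k) (hb : b.length = 2 ^ k) :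
    smtInner (2 ^ i) (a ++ b) = smtInner (2 ^ i) a ++ smtInner (2 ^ i) b := by
  have hi : 2 ^ i < 2 ^ k := Nat.pow_lt_pow_right (by norm_num) hik
  rw [smtInner_eq, smtInner_eq, smtInner_eq, List.length_append, ha, hb, List.range_add,
    List.map_append, List.map_map]
  congr 1
  · apply List.map_congr_left
    intro j hj
    rw [List.mem_range, ← ha] at hj
    rw [pv_getD_append_left hj]
    by_cases hb0 : j &&& 2 ^ i = 0
    · rw [if_pos hb0, if_pos hb0, pv_getD_append_left (by
        rw [ha]; exact Nat.or_lt_two_pow (ha ▸ hj) hi)]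
    · rw [if_neg hb0, if_neg hb0]
  · apply List.map_congr_left
    intro j hj
    rw [List.mem_range] at hj
    simp only [Function.comp]
    have hand : (2 ^ k + j) &&& 2 ^ i = j &&& 2 ^ i := by
      rw [Nat.and_two_pow, Nat.and_two_pow, Nat.testBit_two_pow_add_gt hik]
    have hget1 : (a ++ b).getD (2 ^ k + j) 0 = b.getD j 0 := by
      rw [pv_getD_append_right (by omega), ha, Nat.add_sub_cancel_left]
    rw [hand]
    by_cases hb0 : j &&& 2 ^ i = 0
    · have hor : (2 ^ k + j) ||| 2 ^ i = 2 ^ k + (j ||| 2 ^ i) := by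
        rw [pv_two_pow_add_eq_or hj, Nat.or_assoc,
          ← pv_two_pow_add_eq_or (Nat.or_lt_two_pow hj hi)]
      have hget2 : (a ++ b).getD ((2 ^ k + j) ||| 2 ^ i) 0 = b.getD (j ||| 2 ^ i) 0 := by
        rw [hor, pv_getD_append_right (by omega), ha, Nat.add_sub_cancel_left]
      rw [if_pos hb0, if_pos hb0, hget1, hget2]
    · rw [if_neg hb0, if_neg hb0, hget1]

theorem smtInner_top {k : Nat} {a b : List Int}
    (ha : a.length = 2 ^ k) (hb : b.length = 2 ^ k) :
    smtInner (2 ^ k) (a ++ b) = (a.zip b).map (fun p => p.1 - p.2) ++ b := by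
  rw [smtInner_eq, List.length_append, ha, hb, List.range_add, List.map_append, List.map_map]
  congr 1
  · apply List.ext_getElem
    · simp [ha, hb]
    · intro j h1 h2
      simp only [List.getElem_map, List.getElem_range, List.getElem_zip]
      have hj : j < 2 ^ k := by simpa [ha] using h1
      have hb0 : j &&& 2 ^ k = 0 :=
        (pv_and_two_pow_eq_zero j k).mpr (Nat.testBit_eq_false_of_lt hj)
      have hor : j ||| 2 ^ k = 2 ^ k + j := by
        rw [Nat.or_comm, ← pv_two_pow_add_eq_or hj]
      rw [if_pos hb0, hor, pv_getD_append_left (ha ▸ hj),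
        pv_getD_append_right (by omega), ha, Nat.add_sub_cancel_left,
        List.getD_eq_getElem?_getD, List.getElem?_eq_getElem (by omega),
        List.getD_eq_getElem?_getD, List.getElem?_eq_getElem (by omega)]
      rfl
  · have : ∀ j ∈ List.range (2 ^ k),
        (fun j => if j &&& 2 ^ k = 0 then (a ++ b).getD j 0 - (a ++ b).getD (j ||| 2 ^ k) 0
          else (a ++ b).getD j 0) ((fun x => 2 ^ k + x) j) = b.getD j 0 := by
      intro j hj
      rw [List.mem_range] at hj
      have hband : (2 ^ k + j) &&& 2 ^ k ≠ 0 := by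
        rw [Nat.and_two_pow, Nat.testBit_two_pow_add_eq, Nat.testBit_eq_false_of_lt hj]
        simp
      simp only [if_neg hband]
      rw [pv_getD_append_right (by omega), ha, Nat.add_sub_cancel_left]
    simp only [Function.comp_def]
    rw [List.map_congr_left (fun j hj => this j hj), ← hb, pv_map_getD_range]

-- ---- the layered loop ----

theorem smtLayers_length (k : Nat) (f : List Int) : (smtLayers k f).length = f.length := by
  unfold smtLayers
  induction k with
  | zero => rfl
  | succ n ih => rw [List.range_succ, List.foldl_append, List.foldl_cons, List.foldl_nil,
      Nat.shiftLeft_eq, one_mul, smtInner_length, ih]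

theorem smtLayers_split {k : Nat} : ∀ j ≤ k, ∀ {a b : List Int},
    a.length = 2 ^ k → b.length = 2 ^ k →
    smtLayers j (a ++ b) = smtLayers j a ++ smtLayers j b := by
  intro j
  induction j with
  | zero => intro _ a b _ _; rfl
  | succ n ih =>
      intro hn a b ha hb
      unfold smtLayers
      rw [List.range_succ, List.foldl_append, List.foldl_append, List.foldl_append,
        List.foldl_cons, List.foldl_nil, List.foldl_cons, List.foldl_nil,
        List.foldl_cons, List.foldl_nil]
      have h1 := ih (by omega) ha hb
      unfold smtLayers at h1
      rw [h1]
      simp only [Nat.shiftLeft_eq, one_mul]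
      have hla : ((List.range n).foldl (fun g i => smtInner (1 <<< i) g) a).length = 2 ^ k := by
        have := smtLayers_length n a
        unfold smtLayers at this
        rw [this, ha]
      have hlb : ((List.range n).foldl (fun g i => smtInner (1 <<< i) g) b).length = 2 ^ k := by
        have := smtLayers_length n b
        unfold smtLayers at this
        rw [this, hb]
      simp only [Nat.shiftLeft_eq, one_mul] at hla hlb
      exact smtInner_split (show n < k by omega) hla hlb

theorem smtRec_eq_layers : ∀ (k : Nat) (f : List Int), f.length = 2 ^ k →
    smtLayers k f = smtRec f := by
  intro k
  induction k with
  | zero =>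
      intro f hf
      rw [smtRec]
      rw [if_pos (by omega)]
      rfl
  | succ n ih =>
      intro f hf
      have hpow : (2 : Nat) ^ (n + 1) = 2 ^ n + 2 ^ n := by ring
      have h2 : 2 ≤ f.length := by
        have := Nat.one_le_two_pow (n := n)
        omega
      set a := f.take (2 ^ n) with hadef
      set b := f.drop (2 ^ n) with hbdef
      have ha : a.length = 2 ^ n := by
        rw [hadef, List.length_take]
        omega
      have hb : b.length = 2 ^ n := by
        rw [hbdef, List.length_drop]
        omega
      have hab : a ++ b = f := List.take_append_drop _ f
      have hm : f.length / 2 = 2 ^ n := by omega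
      rw [smtRec, if_neg (by omega)]
      simp only [← hadef, ← hbdef, hm]
      rw [← ih a ha, ← ih b hb, ← hab]
      unfold smtLayers
      rw [List.range_succ, List.foldl_append, List.foldl_cons, List.foldl_nil]
      have hsplit := smtLayers_split (k := n) n le_rfl ha hb
      unfold smtLayers at hsplit
      rw [hsplit]
      simp only [Nat.shiftLeft_eq, one_mul]
      have hla : ((List.range n).foldl (fun g i => smtInner (1 <<< i) g) a).length = 2 ^ n := by
        have := smtLayers_length n a
        unfold smtLayers at this
        rw [this, ha]
      have hlb : ((List.range n).foldl (fun g i => smtInner (1 <<< i) g) b).length = 2 ^ n := by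
        have := smtLayers_length n b
        unfold smtLayers at this
        rw [this, hb]
      simp only [Nat.shiftLeft_eq, one_mul] at hla hlb
      exact smtInner_top hla hlb

-- length = 0 or a power of two, extracted from Pre_
theorem pv_A_eval (f : List Int) :
    superset_mobius_transform f = smtLayers (Nat.size (f.length - 1)) f := rfl

theorem pv_size_pred_pow (k : Nat) : Nat.size (2 ^ k - 1) = k := by
  rcases Nat.eq_zero_or_pos k with rfl | hk
  · simp
  · apply le_antisymm
    · rw [Nat.size_le]
      have := Nat.one_le_two_pow (n := k)
      omega
    · have h1 : 2 ^ (k - 1) ≤ 2 ^ k - 1 := by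
        have h2 : 2 ^ (k - 1) * 2 = 2 ^ k := by
          rw [← pow_succ]; congr 1; omega
        have := Nat.one_le_two_pow (n := k - 1)
        omega
      have := Nat.lt_size.mpr h1
      omega

-- ===== VERDICT (by name: the statement is the Claim_ definition above) =====
theorem superset_mobius_transform_spec : Claim_equal_superset_mobius_transform := by
  intro f _ hpre
  unfold Spec_superset_mobius_transform superset_mobius_transform_alt
  rcases hpre with h0 | ⟨k, _, hk⟩
  · have : f = [] := List.length_eq_zero_iff.mp h0
    subst this
    rw [pv_A_eval]
    rw [smtRec]
    rfl
  · rw [pv_A_eval, hk, pv_size_pred_pow]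
    exact smtRec_eq_layers k f hk
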